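-- pv_equiv track=rewrite | github.com/Shuai-Xie/LeetCode | floor_heater.py | best_heater_floors
-- ===== SOURCE A (Python) =====
-- import itertools
--
-- def best_heater_floors(floors, heaters):
--     """
--     热水器放置问题 两个约束条件
--       1.每层楼的人 打热水 上下楼层最少
--       2.热水器放置的 总楼层数之和最小 成本最小
--     选择时，在能满足 1 的情况下满足 2，先按 1 排序 再按 2
--     :param floors: 楼层总数
--     :param heaters: 热水器数量
--     :return: heater_floors 热水器放置的楼层
--     """
--     # 可能的放置情况，从中选取
--     cand_heater_floors = list(itertools.combinations(range(1, floors + 1), heaters))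
--     total_step_floors = []  # idx corresponds to idx in cand_heater_floors
--     for heater_floors in cand_heater_floors:
--         # each heaters
--         total_steps = 0  # sum of min_step of each person
--         total_floors = sum(heater_floors)
--         for p in range(1, floors + 1):  # 1-5
--             # each person's floor - each heater's floor
--             min_step = min([abs(p - h) for h in heater_floors])
--             total_steps += min_step
--         total_step_floors.append((total_steps, total_floors))
--
--     # 双成本最小的
--     heater_floors = cand_heater_floors[total_step_floors.index(min(total_step_floors))]
--     return heater_floors
-- ===== SOURCE B (Python) =====
-- def best_heater_floors(floors, heaters):
--     """Streaming DFS over the placements with a closed-form cost per placement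
--     (triangular head/tail/gap sums) instead of the per-person scan, keeping the
--     first minimum of (steps, floor-sum)."""
--     best = None
--     chosen = []
--
--     def tri(m):
--         return m * (m + 1) // 2
--
--     def cost():
--         # chosen is built strictly increasing, so each person walks to the
--         # nearest of two adjacent heaters: triangular sums per segment.
--         if not chosen:
--             return 0
--         total = tri(chosen[0] - 1) + tri(floors - chosen[-1])
--         for x, y in zip(chosen, chosen[1:]):
--             d = y - x
--             total += tri(d // 2) + tri((d - 1) // 2)
--         return total
--
--     def dfs(lo, fsum):
--         nonlocal best
--         if len(chosen) == heaters:
--             key = (cost(), fsum)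
--             if best is None or key < best[0]:
--                 best = (key, tuple(chosen))
--             return
--         need = heaters - len(chosen)
--         for h in range(lo, floors - need + 2):  # leave room for the remaining heaters
--             chosen.append(h)
--             dfs(h + 1, fsum + h)
--             chosen.pop()
--
--     dfs(1, 0)
--     return best[1]
-- ===== Notes on version B (the rewrite author's own statement) =====
-- stated objective: alternative
-- what changed: B replaces A's materialize-all-combinations list + per-person nearest-heater scan + separate min()/index() passes by a streaming DFS over the placements that keeps the first minimum of (steps, floor-sum) as it goes and computes each placement's walking cost with a closed-form triangular-sum formula over the gaps between adjacent heaters instead of scanning every floor.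
import Mathlib
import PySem

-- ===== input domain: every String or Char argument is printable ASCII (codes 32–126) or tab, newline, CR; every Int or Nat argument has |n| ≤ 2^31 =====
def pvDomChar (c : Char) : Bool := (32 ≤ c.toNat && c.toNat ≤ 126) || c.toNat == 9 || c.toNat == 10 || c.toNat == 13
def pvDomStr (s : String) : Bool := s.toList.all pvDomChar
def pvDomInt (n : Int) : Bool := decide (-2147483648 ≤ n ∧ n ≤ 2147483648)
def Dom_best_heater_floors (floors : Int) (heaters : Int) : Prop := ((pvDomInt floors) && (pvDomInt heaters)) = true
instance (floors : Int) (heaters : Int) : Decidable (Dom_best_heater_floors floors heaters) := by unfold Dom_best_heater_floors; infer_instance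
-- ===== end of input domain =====

-- B replaces A's materialize-all-combinations + per-person nearest-heater scan + min/index
-- passes by a streaming DFS keeping the first minimum of (steps, floor-sum), with a
-- closed-form triangular-sum walking cost per placement.

-- ===== PORT A =====
-- Python's `<` on int tuples is lexicographic; Lean's `<` on products is pointwise,
-- so the tuple comparison is ported by hand (exact for int pairs).
def pairLt (a b : Int × Int) : Bool := a.1 < b.1 || (a.1 == b.1 && a.2 < b.2)

-- inner person loop of A: total_steps = Σ_p min([abs(p - h) for h in c])
-- (`.getD 0` totalizes `min([])`, which is Python's ValueError; excluded by Pre_)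
def stepsA (floors : Int) (c : List Int) : Int :=
  (PySem.List.pyRange 1 (floors + 1) 1).foldl
    (fun acc p => acc + (PySem.List.min? (c.map fun h => |p - h|) (fun y => y)).getD 0) 0

def best_heater_floors (floors : Int) (heaters : Int) : List Int :=
  -- itertools.combinations(range(1, floors+1), heaters); heaters < 0 raises in Python (outside Pre_)
  let cand := PySem.List.combinations (PySem.List.pyRange 1 (floors + 1) 1) heaters.toNat
  let ts := cand.foldl (fun acc c => acc ++ [(stepsA floors c, c.sum)]) []
  match ts with
  | [] => []        -- min([]) raises ValueError; excluded by Pre_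
  | t0 :: trest =>
    let m := trest.foldl (fun mv x => if pairLt x mv then x else mv) t0  -- min(total_step_floors), first minimal
    match PySem.List.index? ts m with
    | some i => (PySem.List.pyGet? cand (i : Int)).getD []
    | none => []    -- unreachable (m is an element of ts)

-- ===== PORT B =====
def altTri (m : Int) : Int := PySem.Int.floordiv (m * (m + 1)) 2

-- cost(): closed-form walking cost of the strictly increasing `chosen`
-- (chosen[1:] is `t` since chosen is nonempty in that branch)
def altCost (floors : Int) (chosen : List Int) : Int :=
  match chosen with
  | [] => 0
  | h0 :: t =>
    let total := altTri (h0 - 1) + altTri (floors - PySem.List.pyGetD chosen (-1) 0)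
    (chosen.zip t).foldl
      (fun tot xy =>
        tot + (altTri (PySem.Int.floordiv (xy.2 - xy.1) 2)
               + altTri (PySem.Int.floordiv (xy.2 - xy.1 - 1) 2))) total

-- `if best is None or key < best[0]: best = (key, tuple(chosen))`
def altUpdate (best : Option ((Int × Int) × List Int)) (key : Int × Int) (chosen : List Int) :
    Option ((Int × Int) × List Int) :=
  match best with
  | none => some (key, chosen)
  | some b => if pairLt key b.1 then some (key, chosen) else some b

-- dfs(lo, fsum); k counts the heaters still to place (= need = heaters - len(chosen),
-- Python's `len(chosen) == heaters` test; equal for heaters ≥ 0, i.e. inside Pre_);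
-- the loop bound floors - need + 2 is `floors - (k' + 1) + 2` for k = k' + 1
def altDfs (floors : Int) (k : Nat) (chosen : List Int) (fsum : Int) (lo : Int)
    (best : Option ((Int × Int) × List Int)) : Option ((Int × Int) × List Int) :=
  match k with
  | 0 => altUpdate best (altCost floors chosen, fsum) chosen
  | Nat.succ k' =>
    (PySem.List.pyRange lo (floors - (k' : Int) + 1) 1).foldl
      (fun b h => altDfs floors k' (chosen ++ [h]) (fsum + h) (h + 1) b) best

def best_heater_floors_alt (floors : Int) (heaters : Int) : List Int :=
  match altDfs floors heaters.toNat [] 0 1 none with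
  | some b => b.2
  | none => []   -- `best[1]` with best None raises TypeError in Python; excluded by Pre_

-- ===== PRECONDITION & SPEC =====
-- Pre_ is exactly where A returns: 1 ≤ heaters ≤ floors, or the degenerate
-- heaters = 0 with no floors (floors ≤ 0); everywhere else A raises.
def Pre_best_heater_floors (floors : Int) (heaters : Int) : Prop :=
  (1 ≤ heaters ∧ heaters ≤ floors) ∨ (heaters = 0 ∧ floors ≤ 0)
instance (floors : Int) (heaters : Int) : Decidable (Pre_best_heater_floors floors heaters) := by
  unfold Pre_best_heater_floors; infer_instance

def pvWitness_best_heater_floors : Int × Int := (4, 2)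

def Spec_best_heater_floors (floors : Int) (heaters : Int) (out : List Int) : Prop :=
  out = best_heater_floors_alt floors heaters
instance (floors : Int) (heaters : Int) (out : List Int) : Decidable (Spec_best_heater_floors floors heaters out) := by
  unfold Spec_best_heater_floors; infer_instance

-- ===== CLAIM (what is proved, stated in full; the proofs are below) =====
def Claim_equal_best_heater_floors : Prop := ∀ (floors : Int) (heaters : Int), Dom_best_heater_floors floors heaters → Pre_best_heater_floors floors heaters → Spec_best_heater_floors floors heaters (best_heater_floors floors heaters)

-- ===== LEMMAS AND PROOFS =====

-- ---------- the lexicographic Bool comparison ----------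

theorem pairLt_iff (a b : Int × Int) :
    pairLt a b = true ↔ (a.1 < b.1 ∨ (a.1 = b.1 ∧ a.2 < b.2)) := by
  simp [pairLt]

theorem pairLt_false_iff (a b : Int × Int) :
    pairLt a b = false ↔ (b.1 < a.1 ∨ (b.1 = a.1 ∧ b.2 ≤ a.2)) := by
  rw [← Bool.not_eq_true, pairLt_iff]
  constructor <;> intro h <;> omega

theorem pairLt_false_trans {x y z : Int × Int}
    (h1 : pairLt y z = false) (h2 : pairLt x y = false) : pairLt x z = false := by
  rw [pairLt_false_iff] at *
  omega

theorem pairLt_self (a : Int × Int) : pairLt a a = false := by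
  rw [pairLt_false_iff]; omega

theorem pairLt_asymm {a b : Int × Int} (h : pairLt a b = true) : pairLt b a = false := by
  rw [pairLt_iff] at h; rw [pairLt_false_iff]; omega

-- ---------- running first-minimum: on keys and on (key, value) pairs ----------

def minStep (m x : Int × Int) : Int × Int := if pairLt x m then x else m
def selStep (x y : (Int × Int) × List Int) : (Int × Int) × List Int :=
  if pairLt y.1 x.1 then y else x

theorem minStep_le_left (m x : Int × Int) : pairLt m (minStep m x) = false := by
  unfold minStep
  by_cases h : pairLt x m = true
  · rw [if_pos h]; exact pairLt_asymm h
  · rw [if_neg h]; exact pairLt_self m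

theorem minStep_le_right (m x : Int × Int) : pairLt x (minStep m x) = false := by
  unfold minStep
  by_cases h : pairLt x m = true
  · rw [if_pos h]; exact pairLt_self x
  · rw [if_neg h]; exact Bool.eq_false_iff.mpr h

theorem minfold_le (l : List (Int × Int)) (m : Int × Int) :
    (pairLt m (l.foldl minStep m) = false) ∧
      ∀ x ∈ l, pairLt x (l.foldl minStep m) = false := by
  induction l generalizing m with
  | nil => exact ⟨pairLt_self m, by simp⟩
  | cons x l ih =>
    obtain ⟨h1, h2⟩ := ih (minStep m x)
    refine ⟨pairLt_false_trans h1 (minStep_le_left m x), ?_⟩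
    intro y hy
    rcases List.mem_cons.mp hy with rfl | hy'
    · exact pairLt_false_trans h1 (minStep_le_right m y)
    · exact h2 y hy'

theorem find_sel (l : List ((Int × Int) × List Int)) : ∀ (a : (Int × Int) × List Int),
    List.find? (fun x => x.1 == (l.map (·.1)).foldl minStep a.1) (a :: l)
      = some (l.foldl selStep a) := by
  induction l with
  | nil =>
    intro a
    rw [List.find?_cons_of_pos (by simp)]
    rfl
  | cons x l ih =>
    intro a
    have hfst : (selStep a x).1 = minStep a.1 x.1 := by
      simp only [selStep, minStep]
      by_cases h : pairLt x.1 a.1 = true <;> simp [h]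
    have ihx := ih (selStep a x)
    rw [hfst] at ihx
    have hstep1 : ((x :: l).map (·.1)).foldl minStep a.1
        = (l.map (·.1)).foldl minStep (minStep a.1 x.1) := rfl
    have hstep2 : (x :: l).foldl selStep a = l.foldl selStep (selStep a x) := rfl
    rw [hstep1, hstep2]
    have hML := minfold_le (l.map (·.1)) (minStep a.1 x.1)
    set M := (l.map (·.1)).foldl minStep (minStep a.1 x.1) with hMg
    by_cases hx : pairLt x.1 a.1 = true
    · have hminx : minStep a.1 x.1 = x.1 := by simp [minStep, hx]
      have hselx : selStep a x = x := by simp [selStep, hx]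
      rw [hminx] at hML
      have hane : ¬((fun y : (Int × Int) × List Int => y.1 == M) a = true) := by
        simp only [beq_iff_eq]
        intro he
        have h1 := hML.1
        rw [← he] at h1
        rw [pairLt_iff] at hx
        rw [pairLt_false_iff] at h1
        omega
      rw [List.find?_cons_of_neg (p := fun y : (Int × Int) × List Int => y.1 == M) hane]
      rw [hselx] at ihx ⊢
      exact ihx
    · have hminx : minStep a.1 x.1 = a.1 := by simp [minStep, hx]
      have hselx : selStep a x = a := by simp [selStep, hx]
      rw [hminx] at hML
      rw [hselx] at ihx ⊢
      by_cases ha : (a.1 == M) = true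
      · rw [List.find?_cons_of_pos (p := fun y : (Int × Int) × List Int => y.1 == M) ha]
        rw [List.find?_cons_of_pos (p := fun y : (Int × Int) × List Int => y.1 == M) ha] at ihx
        exact ihx
      · rw [List.find?_cons_of_neg (p := fun y : (Int × Int) × List Int => y.1 == M) ha]
        rw [List.find?_cons_of_neg (p := fun y : (Int × Int) × List Int => y.1 == M) ha] at ihx
        have hxne : ¬((fun y : (Int × Int) × List Int => y.1 == M) x = true) := by
          simp only [beq_iff_eq]
          intro he
          apply ha
          simp only [beq_iff_eq]
          have h1 := hML.1
          rw [← he] at h1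
          have h2 : pairLt x.1 a.1 = false := Bool.eq_false_iff.mpr hx
          rw [pairLt_false_iff] at h1 h2
          rw [← he]
          exact Prod.ext (by omega) (by omega)
        rw [List.find?_cons_of_neg (p := fun y : (Int × Int) × List Int => y.1 == M) hxne]
        exact ihx

theorem index_get_find (ps : List ((Int × Int) × List Int)) (m : Int × Int)
    (b : (Int × Int) × List Int)
    (hf : List.find? (fun x => x.1 == m) ps = some b) :
    (match PySem.List.index? (ps.map (·.1)) m with
     | some i => (PySem.List.pyGet? (ps.map (·.2)) (i : Int)).getD []
     | none => []) = b.2 := by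
  induction ps with
  | nil => simp [List.find?] at hf
  | cons x ps ih =>
    by_cases hx : (x.1 == m) = true
    · have hb : b = x := by
        rw [List.find?_cons_of_pos (p := fun y : (Int × Int) × List Int => y.1 == m) hx] at hf
        exact (Option.some_inj.mp hf).symm
      have hxm : x.1 = m := beq_iff_eq.mp hx
      subst hxm
      simp only [List.map_cons, PySem.List.index?_cons_self]
      show (PySem.List.pyGet? (x.2 :: ps.map (·.2)) ((0 : Nat) : Int)).getD [] = b.2
      rw [show ((0 : Nat) : Int) = 0 by simp]
      rw [PySem.List.pyGet?_zero_cons]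
      simp [hb]
    · have hne : x.1 ≠ m := by simpa using hx
      have hf' : List.find? (fun x => x.1 == m) ps = some b := by
        rwa [List.find?_cons_of_neg (p := fun y : (Int × Int) × List Int => y.1 == m) hx] at hf
      have hp := List.find?_some hf'
      have hbm : b.1 = m := by simpa using hp
      have hbmem : b ∈ ps := List.mem_of_find?_eq_some hf'
      simp only [List.map_cons]
      rw [PySem.List.index?_cons_of_ne _ hne]
      cases hidx : PySem.List.index? (ps.map (·.1)) m with
      | none =>
        exfalso
        have : m ∉ ps.map (·.1) := (PySem.List.index?_eq_none_iff _ _).mp hidx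
        exact this (hbm ▸ List.mem_map_of_mem hbmem)
      | some i =>
        simp only [Option.map_some]
        show (PySem.List.pyGet? (x.2 :: ps.map (·.2)) ((i + 1 : Nat) : Int)).getD [] = b.2
        rw [show ((i + 1 : Nat) : Int) = ((i : Nat) : Int) + 1 by push_cast; ring]
        rw [PySem.List.pyGet?_cons_succ]
        have hih := ih hf'
        rw [hidx] at hih
        exact hih

theorem optfold (l : List (List Int)) (key : List Int → Int × Int)
    (a : (Int × Int) × List Int) :
    l.foldl (fun b c => altUpdate b (key c) c) (some a)
      = some ((l.map (fun c => (key c, c))).foldl selStep a) := by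
  induction l generalizing a with
  | nil => rfl
  | cons c l ih =>
    simp only [List.foldl_cons, List.map_cons]
    rw [← ih]
    congr 1
    simp only [altUpdate, selStep]
    by_cases h : pairLt (key c) a.1 = true <;> simp [h]

-- A's min + index + get equals the streaming first-minimum fold of B
theorem select_eq (cand : List (List Int)) (keyA keyB : List Int → Int × Int)
    (hne : cand ≠ []) (hkey : ∀ c ∈ cand, keyA c = keyB c) :
    (let ts := cand.foldl (fun acc c => acc ++ [keyA c]) []
     match ts with
     | [] => ([] : List Int)
     | t0 :: trest =>
       let m := trest.foldl (fun mv x => if pairLt x mv then x else mv) t0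
       match PySem.List.index? ts m with
       | some i => (PySem.List.pyGet? cand (i : Int)).getD []
       | none => [])
    = (match cand.foldl (fun b c => altUpdate b (keyB c) c) none with
       | some b => b.2
       | none => []) := by
  obtain ⟨c0, crest, rfl⟩ := List.exists_cons_of_ne_nil hne
  have hts : (c0 :: crest).foldl (fun acc c => acc ++ [keyA c]) []
      = keyA c0 :: crest.map keyA := by
    rw [PySem.List.foldl_append_singleton_eq_map]
    simp
  -- pairs list
  set ps := (c0 :: crest).map (fun c => (keyA c, c)) with hps
  have hmap1 : ps.map (·.1) = keyA c0 :: crest.map keyA := by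
    simp [hps, List.map_map, Function.comp_def]
  have hmap2 : ps.map (·.2) = c0 :: crest := by
    simp [hps, List.map_map, Function.comp_def]
  have hminstep : (fun mv x => if pairLt x mv then x else mv) = minStep := by
    funext mv x; rfl
  have hfind := find_sel (crest.map (fun c => (keyA c, c))) (keyA c0, c0)
  have hlmap : (crest.map (fun c => (keyA c, c))).map (·.1) = crest.map keyA := by
    simp [List.map_map, Function.comp]
  rw [hlmap] at hfind
  have hig := index_get_find ps
      ((crest.map keyA).foldl minStep (keyA c0))
      ((crest.map (fun c => (keyA c, c))).foldl selStep (keyA c0, c0))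
      (by rw [hps]; simpa using hfind)
  rw [hmap1, hmap2] at hig
  -- B side
  have hb : (c0 :: crest).foldl (fun b c => altUpdate b (keyB c) c) none
      = some ((crest.map (fun c => (keyB c, c))).foldl selStep (keyB c0, c0)) := by
    simp only [List.foldl_cons]
    have h0 : altUpdate none (keyB c0) c0 = some (keyB c0, c0) := rfl
    rw [h0, optfold]
  have hkmap : crest.map (fun c => (keyB c, c)) = crest.map (fun c => (keyA c, c)) := by
    apply List.map_congr_left
    intro c hc
    rw [hkey c (List.mem_cons_of_mem _ hc)]
  have hk0 : keyB c0 = keyA c0 := (hkey c0 (List.mem_cons_self)).symm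
  rw [hkmap, hk0] at hb
  simp only [hts, hminstep, hb]
  exact hig

-- ---------- dfs unrolls to a fold over the combination list ----------

theorem comb_range_full (floors : Int) (k : Nat) :
    ∀ lo, PySem.List.combinations (PySem.List.pyRange lo (floors + 1) 1) (k + 1)
      = (PySem.List.pyRange lo (floors + 1) 1).flatMap
          (fun h => (PySem.List.combinations (PySem.List.pyRange (h + 1) (floors + 1) 1) k).map (h :: ·)) := by
  intro lo
  generalize hn : (floors + 1 - lo).toNat = n
  induction n generalizing lo with
  | zero =>
    rw [PySem.List.pyRange_one_eq_nil (by omega)]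
    simp [PySem.List.combinations_nil_succ]
  | succ n ih =>
    rw [PySem.List.pyRange_one_cons (by omega)]
    rw [PySem.List.combinations_cons_succ]
    rw [List.flatMap_cons]
    congr 1
    exact ih (lo + 1) (by omega)

-- heads past floors - k leave too few floors for the remaining k heaters: empty contribution
theorem comb_head_nil (floors : Int) (k : Nat) (h : Int) (hh : floors - (k : Int) + 1 ≤ h)
    (hh2 : h < floors + 1) :
    (PySem.List.combinations (PySem.List.pyRange (h + 1) (floors + 1) 1) k).map (h :: ·) = [] := by
  cases k with
  | zero => omega
  | succ k' =>
    rw [PySem.List.combinations_eq_nil_of_length_lt]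
    · rfl
    · rw [PySem.List.length_pyRange_one]
      omega

theorem comb_range_succ (floors : Int) (k : Nat) (lo : Int) :
    PySem.List.combinations (PySem.List.pyRange lo (floors + 1) 1) (k + 1)
      = (PySem.List.pyRange lo (floors - (k : Int) + 1) 1).flatMap
          (fun h => (PySem.List.combinations (PySem.List.pyRange (h + 1) (floors + 1) 1) k).map (h :: ·)) := by
  rw [comb_range_full floors k lo]
  by_cases hcase : lo ≤ floors - (k : Int) + 1
  · rw [PySem.List.pyRange_one_append lo (floors - (k : Int) + 1) (floors + 1) hcase (by omega)]
    rw [List.flatMap_append]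
    have hnil : (PySem.List.pyRange (floors - (k : Int) + 1) (floors + 1) 1).flatMap
        (fun h => (PySem.List.combinations (PySem.List.pyRange (h + 1) (floors + 1) 1) k).map (h :: ·)) = [] := by
      apply List.flatMap_eq_nil_iff.mpr
      intro h hmem
      obtain ⟨h1, h2⟩ := (PySem.List.mem_pyRange_one).mp hmem
      exact comb_head_nil floors k h h1 h2
    rw [hnil, List.append_nil]
  · rw [PySem.List.pyRange_one_eq_nil (show floors - (k : Int) + 1 ≤ lo by omega)]
    rw [List.flatMap_nil]
    apply List.flatMap_eq_nil_iff.mpr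
    intro h hmem
    obtain ⟨h1, h2⟩ := (PySem.List.mem_pyRange_one).mp hmem
    exact comb_head_nil floors k h (by omega) h2

theorem foldl_flatMap' {α β γ : Type} (L : List α) (f : α → List β) (g : γ → β → γ) (init : γ) :
    (L.flatMap f).foldl g init = L.foldl (fun b a => (f a).foldl g b) init := by
  induction L generalizing init with
  | nil => rfl
  | cons x L ih => simp [List.flatMap_cons, List.foldl_append, ih]

theorem dfs_eq (floors : Int) (k : Nat) :
    ∀ (lo : Int) (chosen : List Int) (best : Option ((Int × Int) × List Int)),
    altDfs floors k chosen chosen.sum lo best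
      = (PySem.List.combinations (PySem.List.pyRange lo (floors + 1) 1) k).foldl
          (fun b suf => altUpdate b (altCost floors (chosen ++ suf), (chosen ++ suf).sum) (chosen ++ suf)) best := by
  induction k with
  | zero =>
    intro lo chosen best
    simp [altDfs, PySem.List.combinations_zero]
  | succ k ih =>
    intro lo chosen best
    rw [comb_range_succ floors k lo, foldl_flatMap']
    show (PySem.List.pyRange lo (floors - (k : Int) + 1) 1).foldl
        (fun b h => altDfs floors k (chosen ++ [h]) (chosen.sum + h) (h + 1) b) best = _
    have hfun : (fun b h => altDfs floors k (chosen ++ [h]) (chosen.sum + h) (h + 1) b)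
        = (fun b h =>
            ((PySem.List.combinations (PySem.List.pyRange (h + 1) (floors + 1) 1) k).map (h :: ·)).foldl
              (fun b suf => altUpdate b (altCost floors (chosen ++ suf), (chosen ++ suf).sum) (chosen ++ suf)) b) := by
      funext b h
      have hsum : chosen.sum + h = (chosen ++ [h]).sum := by simp
      rw [hsum, ih (h + 1) (chosen ++ [h]) b]
      rw [List.foldl_map]
      congr 1
      funext b' suf
      rw [← List.append_cons]
    rw [hfun]

-- ---------- the closed-form cost equals the per-person scan ----------

-- Σ_p min([abs(p - h) for h in c]) summand (getD-totalized as in the port)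
def mind (c : List Int) (p : Int) : Int :=
  (PySem.List.min? (c.map fun h => |p - h|) (fun y => y)).getD 0

theorem altTri_two (m : Int) : 2 * altTri m = m * (m + 1) := by
  have hd : (2 : Int) ∣ m * (m + 1) := (Int.even_mul_succ_self m).two_dvd
  have h0 : PySem.Int.mod (m * (m + 1)) 2 = 0 := (PySem.Int.mod_eq_zero_iff_dvd _ _).mpr hd
  have h1 := PySem.Int.floordiv_mul_add_mod (m * (m + 1)) 2
  rw [h0] at h1
  unfold altTri
  linarith

theorem altTri_succ (m : Int) : altTri m = m + altTri (m - 1) := by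
  have t1 := altTri_two m
  have t2 := altTri_two (m - 1)
  have hr : m * (m + 1) = (m - 1) * (m - 1 + 1) + 2 * m := by ring
  linarith

theorem halves (d : Int) (h : 1 ≤ d) :
    PySem.Int.floordiv (d - 1) 2 = d - 1 - PySem.Int.floordiv d 2 := by
  have h2 : (0 : Int) < 2 := by norm_num
  have hq := (PySem.Int.floordiv_eq_iff_of_pos h2).mp (rfl : PySem.Int.floordiv d 2 = _)
  rw [PySem.Int.floordiv_eq_iff_of_pos h2]
  constructor <;> omega

theorem triL (n : Nat) : ∀ (a h : Int), a ≤ h + 1 → (h + 1 - a).toNat = n →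
    ((PySem.List.pyRange a (h + 1) 1).map (fun p => h - p)).sum = altTri (h - a) := by
  induction n with
  | zero =>
    intro a h h1 h2
    rw [PySem.List.pyRange_one_eq_nil (by omega)]
    rw [show h - a = -1 by omega]
    simp only [List.map_nil, List.sum_nil]
    have h4 := altTri_two (-1)
    norm_num at h4
    omega
  | succ n ih =>
    intro a h h1 h2
    rw [PySem.List.pyRange_one_cons (by omega)]
    simp only [List.map_cons, List.sum_cons]
    rw [ih (a + 1) h (by omega) (by omega)]
    have hx : h - (a + 1) = h - a - 1 := by ring
    rw [hx]
    linarith [altTri_succ (h - a)]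

theorem triR (n : Nat) : ∀ (h b : Int), h ≤ b → (b - h).toNat = n →
    ((PySem.List.pyRange (h + 1) (b + 1) 1).map (fun p => p - h)).sum = altTri (b - h) := by
  induction n with
  | zero =>
    intro h b h1 h2
    rw [PySem.List.pyRange_one_eq_nil (by omega)]
    rw [show b - h = 0 by omega]
    simp only [List.map_nil, List.sum_nil]
    have h4 := altTri_two 0
    norm_num at h4
    omega
  | succ n ih =>
    intro h b h1 h2
    have ihb := ih h (b - 1) (by omega) (by omega)
    rw [show b - 1 + 1 = b by ring] at ihb
    rw [PySem.List.pyRange_one_succ_right (by omega : h + 1 ≤ b)]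
    rw [List.map_append, List.sum_append, ihb]
    simp only [List.map_cons, List.map_nil, List.sum_cons, List.sum_nil]
    rw [show b - 1 - h = b - h - 1 by ring]
    linarith [altTri_succ (b - h)]

theorem foldl_min_comm (l : List Int) : ∀ (a b : Int), l.foldl min (min a b) = min a (l.foldl min b) := by
  induction l with
  | nil => intro a b; rfl
  | cons x l ih =>
    intro a b
    simp only [List.foldl_cons]
    rw [min_assoc, ih]

theorem mind_singleton (h0 p : Int) : mind [h0] p = |p - h0| := by
  simp [mind, PySem.List.min?_id_cons]

theorem mind_cons (h0 h1 : Int) (t : List Int) (p : Int) :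
    mind (h0 :: h1 :: t) p = min (|p - h0|) (mind (h1 :: t) p) := by
  simp only [mind, List.map_cons, PySem.List.min?_id_cons, List.foldl_cons, Option.getD_some]
  rw [foldl_min_comm]

theorem mind_above : ∀ (t : List Int) (h0 p : Int), (h0 :: t).Pairwise (· < ·) → p ≤ h0 →
    mind (h0 :: t) p = h0 - p := by
  intro t
  induction t with
  | nil =>
    intro h0 p _ hp
    rw [mind_singleton]
    rw [abs_sub_comm, abs_of_nonneg (by omega)]
  | cons h1 t ih =>
    intro h0 p hs hp
    obtain ⟨hall, hs'⟩ := List.pairwise_cons.mp hs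
    have h01 : h0 < h1 := hall h1 (by simp)
    rw [mind_cons, ih h1 p hs' (by omega)]
    rw [abs_sub_comm, abs_of_nonneg (by omega)]
    omega

theorem mind_head (h0 h1 : Int) (t : List Int) (p : Int)
    (hs : (h0 :: h1 :: t).Pairwise (· < ·)) (hp : 2 * p ≤ h0 + h1) :
    mind (h0 :: h1 :: t) p = |p - h0| := by
  obtain ⟨hall, hs'⟩ := List.pairwise_cons.mp hs
  have h01 : h0 < h1 := hall h1 (by simp)
  rw [mind_cons, mind_above t h1 p hs' (by omega)]
  rcases abs_cases (p - h0) with ⟨he, _⟩ | ⟨he, _⟩ <;> omega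

theorem mind_drop (h0 h1 : Int) (t : List Int) (p : Int)
    (hs : (h0 :: h1 :: t).Pairwise (· < ·)) (hp : h0 + h1 < 2 * p) :
    mind (h0 :: h1 :: t) p = mind (h1 :: t) p := by
  obtain ⟨hall, hs'⟩ := List.pairwise_cons.mp hs
  have h01 : h0 < h1 := hall h1 (by simp)
  rw [mind_cons]
  have hval : mind (h1 :: t) p = (t.map fun h => |p - h|).foldl min (|p - h1|) := by
    simp [mind, PySem.List.min?_id_cons]
  have hle1 : mind (h1 :: t) p ≤ |p - h1| := by
    rw [hval]
    exact (PySem.List.foldl_min_le _ _).1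
  have hle0 : |p - h1| ≤ |p - h0| := by
    rcases abs_cases (p - h0) with ⟨he, _⟩ | ⟨he, _⟩ <;>
      rcases abs_cases (p - h1) with ⟨he', _⟩ | ⟨he', _⟩ <;> omega
  exact min_eq_right (le_trans hle1 hle0)

def gaps (c : List Int) : Int :=
  ((c.zip c.tail).map (fun xy =>
    altTri (PySem.Int.floordiv (xy.2 - xy.1) 2) + altTri (PySem.Int.floordiv (xy.2 - xy.1 - 1) 2))).sum

theorem altCost_eq (floors h0 : Int) (t : List Int) :
    altCost floors (h0 :: t)
      = altTri (h0 - 1) + altTri (floors - (h0 :: t).getLast (by simp)) + gaps (h0 :: t) := by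
  show ((h0 :: t).zip t).foldl _ _ = _
  rw [PySem.List.foldl_add
    (g := fun xy : Int × Int => altTri (PySem.Int.floordiv (xy.2 - xy.1) 2)
      + altTri (PySem.Int.floordiv (xy.2 - xy.1 - 1) 2))]
  rw [PySem.List.pyGetD_neg_one (h0 :: t) 0 (by simp)]
  rfl

theorem last_ge_head : ∀ (t : List Int) (h1 : Int), (h1 :: t).Pairwise (· < ·) →
    h1 ≤ (h1 :: t).getLast (by simp) := by
  intro t
  induction t with
  | nil => intro h1 _; simp
  | cons h2 t ih =>
    intro h1 hs
    obtain ⟨hall, hs'⟩ := List.pairwise_cons.mp hs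
    have := ih h2 hs'
    rw [List.getLast_cons (by simp)]
    have h12 : h1 < h2 := hall h2 (by simp)
    omega

theorem cost_sum : ∀ (t : List Int) (h0 : Int), (h0 :: t).Pairwise (· < ·) →
    ∀ (a n : Int), a ≤ h0 → (h0 :: t).getLast (by simp) ≤ n →
    ((PySem.List.pyRange a (n + 1) 1).map (mind (h0 :: t))).sum
      = altTri (h0 - a) + altTri (n - (h0 :: t).getLast (by simp)) + gaps (h0 :: t) := by
  intro t
  induction t with
  | nil =>
    intro h0 _ a n ha hn
    simp only [List.getLast_singleton] at hn ⊢
    have hg : gaps [h0] = 0 := by simp [gaps]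
    rw [hg]
    rw [PySem.List.pyRange_one_append a (h0 + 1) (n + 1) (by omega) (by omega)]
    rw [List.map_append, List.sum_append]
    have e1 : (PySem.List.pyRange a (h0 + 1) 1).map (mind [h0])
        = (PySem.List.pyRange a (h0 + 1) 1).map (fun p => h0 - p) := by
      apply List.map_congr_left
      intro p hp
      obtain ⟨hp1, hp2⟩ := (PySem.List.mem_pyRange_one).mp hp
      rw [mind_singleton, abs_sub_comm, abs_of_nonneg (by omega)]
    have e2 : (PySem.List.pyRange (h0 + 1) (n + 1) 1).map (mind [h0])
        = (PySem.List.pyRange (h0 + 1) (n + 1) 1).map (fun p => p - h0) := by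
      apply List.map_congr_left
      intro p hp
      obtain ⟨hp1, hp2⟩ := (PySem.List.mem_pyRange_one).mp hp
      rw [mind_singleton, abs_of_nonneg (by omega)]
    rw [e1, e2, triL (h0 + 1 - a).toNat a h0 (by omega) rfl, triR (n - h0).toNat h0 n (by omega) rfl]
    omega
  | cons h1 t ih =>
    intro h0 hs a n ha hn
    obtain ⟨hall, hs'⟩ := List.pairwise_cons.mp hs
    have h01 : h0 < h1 := hall h1 (by simp)
    set q := PySem.Int.floordiv (h1 - h0) 2 with hqdef
    have hq := (PySem.Int.floordiv_eq_iff_of_pos (by norm_num : (0:Int) < 2)).mp hqdef.symm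
    have hlast : (h0 :: h1 :: t).getLast (by simp) = (h1 :: t).getLast (by simp) := by
      rw [List.getLast_cons (by simp)]
    have hheadlast : h1 ≤ (h1 :: t).getLast (by simp) := last_ge_head t h1 hs'
    rw [hlast] at hn ⊢
    have hqb : h0 + q < h1 ∧ 0 ≤ q := by omega
    -- split the person range at h0 + q + 1
    rw [PySem.List.pyRange_one_append a (h0 + q + 1) (n + 1) (by omega) (by omega)]
    rw [List.map_append, List.sum_append]
    have e1 : (PySem.List.pyRange a (h0 + q + 1) 1).map (mind (h0 :: h1 :: t))
        = (PySem.List.pyRange a (h0 + q + 1) 1).map (fun p => |p - h0|) := by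
      apply List.map_congr_left
      intro p hp
      obtain ⟨hp1, hp2⟩ := (PySem.List.mem_pyRange_one).mp hp
      exact mind_head h0 h1 t p hs (by omega)
    have e2 : (PySem.List.pyRange (h0 + q + 1) (n + 1) 1).map (mind (h0 :: h1 :: t))
        = (PySem.List.pyRange (h0 + q + 1) (n + 1) 1).map (mind (h1 :: t)) := by
      apply List.map_congr_left
      intro p hp
      obtain ⟨hp1, hp2⟩ := (PySem.List.mem_pyRange_one).mp hp
      exact mind_drop h0 h1 t p hs (by omega)
    rw [e1, e2]
    rw [ih h1 hs' (h0 + q + 1) n (by omega) hn]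
    -- first block: triangles around h0
    have e3 : ((PySem.List.pyRange a (h0 + q + 1) 1).map (fun p => |p - h0|)).sum
        = altTri (h0 - a) + altTri q := by
      rw [PySem.List.pyRange_one_append a (h0 + 1) (h0 + q + 1) (by omega) (by omega)]
      rw [List.map_append, List.sum_append]
      have f1 : (PySem.List.pyRange a (h0 + 1) 1).map (fun p => |p - h0|)
          = (PySem.List.pyRange a (h0 + 1) 1).map (fun p => h0 - p) := by
        apply List.map_congr_left
        intro p hp
        obtain ⟨hp1, hp2⟩ := (PySem.List.mem_pyRange_one).mp hp
        rw [abs_sub_comm, abs_of_nonneg (by omega)]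
      have f2 : (PySem.List.pyRange (h0 + 1) (h0 + q + 1) 1).map (fun p => |p - h0|)
          = (PySem.List.pyRange (h0 + 1) (h0 + q + 1) 1).map (fun p => p - h0) := by
        apply List.map_congr_left
        intro p hp
        obtain ⟨hp1, hp2⟩ := (PySem.List.mem_pyRange_one).mp hp
        rw [abs_of_nonneg (by omega)]
      rw [f1, f2, triL (h0 + 1 - a).toNat a h0 (by omega) rfl,
        triR (h0 + q - h0).toNat h0 (h0 + q) (by omega) rfl]
      rw [show h0 + q - h0 = q by ring]
    rw [e3]
    -- gap recursion and the (d-1)//2 identity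
    have hg : gaps (h0 :: h1 :: t)
        = (altTri (PySem.Int.floordiv (h1 - h0) 2) + altTri (PySem.Int.floordiv (h1 - h0 - 1) 2))
          + gaps (h1 :: t) := by
      simp [gaps]
    have hh : altTri (h1 - (h0 + q + 1)) = altTri (PySem.Int.floordiv (h1 - h0 - 1) 2) := by
      rw [halves (h1 - h0) (by omega), ← hqdef]
      congr 1
      omega
    rw [hg, ← hh, hqdef]
    ring

theorem stepsA_eq_altCost (floors : Int) (c : List Int) (hne : c ≠ [])
    (hs : c.Pairwise (· < ·)) (hb : ∀ h ∈ c, 1 ≤ h ∧ h ≤ floors) :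
    stepsA floors c = altCost floors c := by
  obtain ⟨h0, t, rfl⟩ := List.exists_cons_of_ne_nil hne
  unfold stepsA
  rw [PySem.List.foldl_add
    (g := fun p => (PySem.List.min? ((h0 :: t).map fun h => |p - h|) (fun y => y)).getD 0)]
  rw [zero_add]
  have hm : (fun p => (PySem.List.min? ((h0 :: t).map fun h => |p - h|) (fun y => y)).getD 0)
      = mind (h0 :: t) := rfl
  rw [hm]
  have h1 : 1 ≤ h0 := (hb h0 (by simp)).1
  have h2 : (h0 :: t).getLast (by simp) ≤ floors :=
    (hb _ (List.getLast_mem _)).2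
  rw [cost_sum t h0 hs 1 floors h1 h2, altCost_eq]

theorem stepsA_nil (floors : Int) (h : floors ≤ 0) : stepsA floors [] = 0 := by
  unfold stepsA
  rw [PySem.List.pyRange_one_eq_nil (by omega)]
  rfl

-- ===== VERDICT (by name: the statement is the Claim_ definition above) =====
theorem best_heater_floors_spec : Claim_equal_best_heater_floors := by
  intro floors heaters _ hpre
  unfold Spec_best_heater_floors
  unfold best_heater_floors best_heater_floors_alt
  have hdfs := dfs_eq floors heaters.toNat 1 [] none
  simp only [List.sum_nil, List.nil_append] at hdfs
  rw [hdfs]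
  set cand := PySem.List.combinations (PySem.List.pyRange 1 (floors + 1) 1) heaters.toNat with hcand
  have hkey : ∀ c ∈ cand, ((stepsA floors c, c.sum) : Int × Int) = (altCost floors c, c.sum) := by
    intro c hc
    obtain ⟨hsub, hlen⟩ := (PySem.List.mem_combinations_iff _ _ _).mp hc
    rcases hpre with ⟨hh1, hh2⟩ | ⟨hh1, hh2⟩
    · have hcne : c ≠ [] := by
        intro h
        rw [h] at hlen
        simp at hlen
        omega
      have hpair : c.Pairwise (· < ·) :=
        (PySem.List.pairwise_lt_pyRange_one _ _).sublist hsub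
      have hbnd : ∀ h ∈ c, 1 ≤ h ∧ h ≤ floors := by
        intro h hh
        have := (PySem.List.mem_pyRange_one).mp (hsub.subset hh)
        omega
      rw [stepsA_eq_altCost floors c hcne hpair hbnd]
    · have hk0 : heaters.toNat = 0 := by omega
      rw [hk0] at hlen
      have hcnil : c = [] := List.length_eq_zero_iff.mp hlen
      rw [hcnil, stepsA_nil floors hh2]
      rfl
  have hne : cand ≠ [] := by
    rcases hpre with ⟨hh1, hh2⟩ | ⟨hh1, _⟩
    · apply List.ne_nil_of_mem (a := (PySem.List.pyRange 1 (floors + 1) 1).take heaters.toNat)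
      apply (PySem.List.mem_combinations_iff _ _ _).mpr
      refine ⟨List.take_sublist _ _, ?_⟩
      rw [List.length_take]
      apply Nat.min_eq_left
      rw [PySem.List.length_pyRange_one]
      omega
    · have hk0 : heaters.toNat = 0 := by omega
      rw [hcand, hk0, PySem.List.combinations_zero]
      simp
  exact select_eq cand (fun c => (stepsA floors c, c.sum)) (fun c => (altCost floors c, c.sum)) hne hkey
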